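-- pv_equiv track=rewrite | github.com/dmkfasi/python-ds | week1/day3.py | witnesses
-- ===== SOURCE A (Python) =====
-- def witnesses(heights):
--   # Fill this in.
--
-- 	# Assume the first person in line is the tallest one
-- 	m = heights[0]
--
-- 	ql = len(heights)
-- 	mi = 0
-- 	cnt = 0
--
-- 	# Find actual tallest person
-- 	for i in range(1, ql):
-- 		height = heights[i]
--
-- 		if height >= m:
-- 			m = height
-- 			mi = i
--
-- 	# Whenever tallest person is the last in line
-- 	if mi == (ql - 1):
-- 		return 1
--
-- 	# Get this very person into account
-- 	cnt = cnt + 1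
--
-- 	# Slice people line by the tallest person
-- 	heights = heights[mi + 1:]
--
-- 	# Dive in to find other tallest people
-- 	cnt = cnt + witnesses(heights)
--
-- 	return cnt
-- ===== SOURCE B (Python) =====
-- def witnesses(heights):
--     cnt = 0
--     best = None
--     for h in reversed(heights):
--         if best is None or h > best:
--             cnt += 1
--             best = h
--     return cnt
-- ===== Notes on version B (the rewrite author's own statement) =====
-- stated objective: faster
-- what changed: A repeatedly scans the whole remaining list to find the last maximum and recurses on the suffix after it (quadratic in the worst case); B makes a single right-to-left pass counting elements strictly greater than the running suffix maximum.
import Mathlib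
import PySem

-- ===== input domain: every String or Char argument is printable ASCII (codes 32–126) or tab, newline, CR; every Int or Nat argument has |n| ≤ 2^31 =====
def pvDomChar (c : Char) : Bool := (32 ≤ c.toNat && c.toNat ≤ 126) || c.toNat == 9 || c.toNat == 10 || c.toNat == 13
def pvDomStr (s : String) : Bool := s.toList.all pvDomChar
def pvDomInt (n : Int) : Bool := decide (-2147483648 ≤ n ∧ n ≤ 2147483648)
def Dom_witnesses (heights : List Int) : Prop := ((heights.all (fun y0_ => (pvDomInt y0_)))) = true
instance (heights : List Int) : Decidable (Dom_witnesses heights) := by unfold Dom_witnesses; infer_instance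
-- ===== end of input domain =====

-- B replaces A's quadratic find-last-max-then-recurse-on-suffix with one right-to-left
-- pass counting elements strictly above the running suffix maximum (objective: faster).

-- ===== PORT A =====
-- body of A's `for i in range(1, ql)` loop: state (m, mi)
def witStep (heights : List Int) (st : Int × Int) (i : Int) : Int × Int :=
  let height := PySem.List.pyGetD heights i 0
  if height ≥ st.1 then (height, i) else st

-- invariant needed only for the termination proof of the port of A (mi stays ≥ 0)
theorem witStep_snd_nonneg (heights : List Int) (l : List Int) :
    ∀ (init : Int × Int), 0 ≤ init.2 → (∀ i ∈ l, 0 ≤ i) →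
    0 ≤ (l.foldl (witStep heights) init).2 := by
  induction l with
  | nil => intro init h _; simpa using h
  | cons x xs ih =>
    intro init h hl
    simp only [List.foldl_cons]
    refine ih _ ?_ (fun i hi => hl i (List.mem_cons_of_mem _ hi))
    unfold witStep
    dsimp only
    split
    · exact hl x (List.mem_cons_self ..)
    · exact h

def witnesses : List Int → Int
  | [] => 0  -- Python raises IndexError here (heights[0]); excluded by Pre_witnesses
  | h :: t =>
    let heights := h :: t
    let ql := PySem.List.len heights
    let st := (PySem.List.pyRange 1 ql 1).foldl (witStep heights) (h, 0)
    if st.2 = ql - 1 then 1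
    else 1 + witnesses (PySem.List.slice heights (some (st.2 + 1)) none)
termination_by l => l.length
decreasing_by
  have hmi : 0 ≤ ((PySem.List.pyRange 1 (PySem.List.len (h :: t)) 1).foldl
      (witStep (h :: t)) (h, 0)).2 := by
    refine witStep_snd_nonneg _ _ _ (by norm_num) ?_
    intro i hi
    have := (PySem.List.mem_pyRange_one.mp hi).1
    omega
  rw [PySem.List.slice_from _ (by omega)]
  simp only [List.length_drop, List.length_cons]
  omega

-- ===== PORT B =====
-- body of B's loop over reversed(heights): state (cnt, best)
def altStep (st : Int × Option Int) (h : Int) : Int × Option Int :=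
  match st.2 with
  | none => (st.1 + 1, some h)
  | some b => if h > b then (st.1 + 1, some h) else st

def witnesses_alt (heights : List Int) : Int :=
  (heights.reverse.foldl altStep (0, none)).1

-- ===== PRECONDITION & SPEC =====
-- Pre_ excludes only the empty list, on which A raises IndexError (heights[0]).
def Pre_witnesses (heights : List Int) : Prop := heights ≠ []
instance (heights : List Int) : Decidable (Pre_witnesses heights) := by unfold Pre_witnesses; infer_instance
def pvWitness_witnesses : List Int := [3, 6, 3, 4, 1]

def Spec_witnesses (heights : List Int) (out : Int) : Prop := out = witnesses_alt heights
instance (heights : List Int) (out : Int) : Decidable (Spec_witnesses heights out) := by unfold Spec_witnesses; infer_instance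

-- ===== CLAIM (what is proved, stated in full; the proofs are below) =====
def Claim_equal_witnesses : Prop := ∀ (heights : List Int), Dom_witnesses heights → Pre_witnesses heights → Spec_witnesses heights (witnesses heights)

-- ===== LEMMAS AND PROOFS =====

-- the common characterisation: number of elements strictly greater than everything to their right
def cnt : List Int → Int
  | [] => 0
  | h :: t => (if ∀ x ∈ t, x < h then 1 else 0) + cnt t

-- the maximum of a list as an Option (none on [])
def mo : List Int → Option Int
  | [] => none
  | h :: t => some (match mo t with | none => h | some m => max h m)

theorem mo_eq_none {l : List Int} (h : mo l = none) : l = [] := by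
  cases l with
  | nil => rfl
  | cons x xs => simp [mo] at h

theorem mo_spec : ∀ {l : List Int} {m : Int}, mo l = some m → m ∈ l ∧ ∀ x ∈ l, x ≤ m := by
  intro l
  induction l with
  | nil => intro m h; simp [mo] at h
  | cons x xs ih =>
    intro m h
    simp only [mo] at h
    cases hmo : mo xs with
    | none =>
      have hx : xs = [] := mo_eq_none hmo
      subst hx
      simp [mo] at h
      simp [h]
    | some m' =>
      rw [hmo] at h
      obtain ⟨hmem, hle⟩ := ih hmo
      have hm : m = max x m' := by injection h with h; exact h.symm
      constructor
      · rcases le_total x m' with hc | hc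
        · rw [hm, max_eq_right hc]; exact List.mem_cons_of_mem _ hmem
        · rw [hm, max_eq_left hc]; exact List.mem_cons_self ..
      · intro y hy
        rcases List.mem_cons.mp hy with rfl | hy
        · rw [hm]; exact le_max_left _ _
        · rw [hm]; exact le_trans (hle y hy) (le_max_right _ _)

theorem alt_inv : ∀ (l : List Int) (c : Int),
    l.reverse.foldl altStep (c, none) = (c + cnt l, mo l) := by
  intro l
  induction l with
  | nil => intro c; simp [cnt, mo]
  | cons h t ih =>
    intro c
    simp only [List.reverse_cons, List.foldl_append, ih c, List.foldl_cons, List.foldl_nil]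
    cases hmo : mo t with
    | none =>
      have ht : t = [] := mo_eq_none hmo
      subst ht
      simp [altStep, cnt, mo]
    | some m =>
      obtain ⟨hmem, hle⟩ := mo_spec hmo
      simp only [altStep]
      by_cases hcmp : h > m
      · rw [if_pos hcmp]
        have hall : ∀ x ∈ t, x < h := fun x hx => lt_of_le_of_lt (hle x hx) hcmp
        simp only [cnt, mo, hmo, if_pos hall, Prod.mk.injEq]
        refine ⟨by omega, ?_⟩
        rw [max_eq_left (le_of_lt hcmp)]
      · rw [if_neg hcmp]
        have hnall : ¬ ∀ x ∈ t, x < h := fun hall => hcmp (hall m hmem)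
        simp only [cnt, mo, hmo, if_neg hnall, Prod.mk.injEq]
        refine ⟨by omega, ?_⟩
        rw [max_eq_right (by omega : h ≤ m)]

theorem alt_eq_cnt (l : List Int) : witnesses_alt l = cnt l := by
  unfold witnesses_alt
  rw [alt_inv l 0]
  simp

-- invariant of A's max-finding loop after scanning indices [1, k)
def FoldInv (heights : List Int) (k : Int) (st : Int × Int) : Prop :=
  0 ≤ st.2 ∧ st.2 < k ∧ PySem.List.pyGetD heights st.2 0 = st.1 ∧
  (∀ j : Int, 0 ≤ j → j < k → PySem.List.pyGetD heights j 0 ≤ st.1) ∧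
  (∀ j : Int, st.2 < j → j < k → PySem.List.pyGetD heights j 0 < st.1)

theorem foldInv_step {heights : List Int} {k : Int} {st : Int × Int}
    (h : FoldInv heights k st) : FoldInv heights (k + 1) (witStep heights st k) := by
  obtain ⟨h0, h1, h2, h3, h4⟩ := h
  unfold witStep
  dsimp only
  split
  · rename_i hge
    refine ⟨by omega, by omega, rfl, ?_, ?_⟩
    · intro j hj0 hjk
      rcases lt_or_ge j k with hc | hc
      · exact le_trans (h3 j hj0 hc) hge
      · have : j = k := by omega
        subst this; exact le_refl _
    · intro j hj1 hj2; omega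
  · rename_i hlt
    rw [not_le] at hlt
    refine ⟨h0, by omega, h2, ?_, ?_⟩
    · intro j hj0 hjk
      rcases lt_or_ge j k with hc | hc
      · exact h3 j hj0 hc
      · have : j = k := by omega
        subst this; omega
    · intro j hj1 hj2
      rcases lt_or_ge j k with hc | hc
      · exact h4 j hj1 hc
      · have : j = k := by omega
        subst this; omega

theorem foldA_inv (h : Int) (t : List Int) (n : Nat) :
    FoldInv (h :: t) (1 + (n : Int))
      ((PySem.List.pyRange 1 (1 + (n : Int)) 1).foldl (witStep (h :: t)) (h, 0)) := by
  induction n with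
  | zero =>
    rw [show ((1 : Int) + ((0 : Nat) : Int)) = 1 by norm_num]
    rw [PySem.List.pyRange_one_eq_nil (by norm_num)]
    simp only [List.foldl_nil]
    refine ⟨le_refl 0, by norm_num, by simp [PySem.List.pyGetD_zero_cons], ?_, ?_⟩
    · intro j hj0 hj1
      have : j = 0 := by omega
      subst this; simp [PySem.List.pyGetD_zero_cons]
    · intro j hj1 hj2; omega
  | succ n ih =>
    rw [show ((1 : Int) + ((n + 1 : Nat) : Int)) = (1 + (n : Int)) + 1 by push_cast; ring]
    rw [PySem.List.pyRange_one_succ_right (by omega)]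
    rw [List.foldl_append, List.foldl_cons, List.foldl_nil]
    exact foldInv_step ih

-- counting over a decomposition around the (last) maximum
theorem cnt_decomp (L R : List Int) (m : Int)
    (hL : ∀ x ∈ L, x ≤ m) (hR : ∀ x ∈ R, x < m) :
    cnt (L ++ m :: R) = 1 + cnt R := by
  induction L with
  | nil => simp only [List.nil_append, cnt, if_pos hR]
  | cons x L ih =>
    have hx : x ≤ m := hL x (List.mem_cons_self ..)
    have hmem : m ∈ L ++ m :: R := by simp
    have hnall : ¬ ∀ y ∈ L ++ m :: R, y < x := by
      intro hall
      have := hall m hmem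
      omega
    simp only [List.cons_append, cnt, if_neg hnall]
    rw [ih (fun y hy => hL y (List.mem_cons_of_mem _ hy))]
    ring

theorem A_eq_cnt_aux : ∀ (n : Nat) (l : List Int), l.length ≤ n → l ≠ [] → witnesses l = cnt l := by
  intro n
  induction n with
  | zero =>
    intro l hl hne
    cases l with
    | nil => exact absurd rfl hne
    | cons h t => simp at hl
  | succ n ih =>
    intro l hl hne
    cases l with
    | nil => exact absurd rfl hne
    | cons h t =>
      rw [witnesses]
      have hlen1 : PySem.List.len (h :: t) = 1 + (t.length : Int) := by
        simp [PySem.List.len_eq]; ring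
      simp only [hlen1]
      have hfold := foldA_inv h t t.length
      set st := (PySem.List.pyRange 1 (1 + (t.length : Int)) 1).foldl (witStep (h :: t)) (h, 0) with hst
      obtain ⟨h0, h1, h2, h3, h4⟩ := hfold
      -- decomposition of the list around index st.2
      set N := st.2.toNat with hN
      have hNlt : N < (h :: t).length := by simp only [List.length_cons]; omega
      have hm : (h :: t)[N] = st.1 := by
        rw [← PySem.List.pyGetD_eq_getElem (h :: t) (0 : Int) h0
          (by simp only [List.length_cons]; omega)]
        exact h2
      have hdecomp : h :: t = (h :: t).take N ++ st.1 :: (h :: t).drop (N + 1) := by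
        conv_lhs => rw [← List.take_append_drop N (h :: t)]
        rw [← List.getElem_cons_drop hNlt, hm]
      have hLle : ∀ x ∈ (h :: t).take N, x ≤ st.1 := by
        intro x hx
        obtain ⟨i, hi, hix⟩ := List.mem_iff_getElem.mp hx
        have hi' : i < (h :: t).length := lt_of_lt_of_le hi (by simp [List.length_take])
        rw [List.getElem_take] at hix
        have := h3 (i : Int) (by omega) (by simp only [List.length_cons] at hi'; omega)
        rw [PySem.List.pyGetD_eq_getElem (h :: t) (0 : Int) (by omega) (by exact_mod_cast hi')] at this
        simpa [hix] using this
      have hRlt : ∀ x ∈ (h :: t).drop (N + 1), x < st.1 := by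
        intro x hx
        obtain ⟨i, hi, hix⟩ := List.mem_iff_getElem.mp hx
        rw [List.getElem_drop] at hix
        have hi' : N + 1 + i < (h :: t).length := by
          simp only [List.length_drop] at hi; omega
        have := h4 ((N + 1 + i : Nat) : Int) (by push_cast; omega)
          (by simp only [List.length_cons] at hi'; push_cast; omega)
        rw [PySem.List.pyGetD_eq_getElem (h :: t) (0 : Int) (by omega) (by exact_mod_cast hi')] at this
        simp only [Int.toNat_natCast] at this
        omega
      have hcnt : cnt (h :: t) = 1 + cnt ((h :: t).drop (N + 1)) := by
        conv_lhs => rw [hdecomp]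
        exact cnt_decomp _ _ _ hLle hRlt
      by_cases hmi : st.2 = (1 + (t.length : Int)) - 1
      · rw [if_pos hmi]
        have hdropnil : (h :: t).drop (N + 1) = [] := by
          apply List.drop_eq_nil_of_le
          simp only [List.length_cons]
          omega
        rw [hcnt, hdropnil]
        simp [cnt]
      · rw [if_neg hmi]
        rw [PySem.List.slice_from _ (by omega)]
        have htn : (st.2 + 1).toNat = N + 1 := by omega
        rw [htn]
        have hdne : (h :: t).drop (N + 1) ≠ [] := by
          apply List.ne_nil_of_length_pos
          simp only [List.length_drop, List.length_cons]
          omega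
        have hdlen : ((h :: t).drop (N + 1)).length ≤ n := by
          simp only [List.length_drop, List.length_cons]
          simp only [List.length_cons] at hl
          omega
        rw [ih _ hdlen hdne, hcnt]

-- ===== VERDICT (by name: the statement is the Claim_ definition above) =====
theorem witnesses_spec : Claim_equal_witnesses := by
  intro heights _ hpre
  unfold Spec_witnesses
  rw [alt_eq_cnt, A_eq_cnt_aux heights.length heights (le_refl _) hpre]
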